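-- pv_equiv track=rewrite | github.com/m1sterzer0/JuliaAtcoder | python/abc200_209/abc207_F.py | dfs
-- ===== SOURCE A (Python) =====
-- def convolve(a1,a2,mm) :
--     a3 = [0] * (len(a1)+len(a2)-1)
--     for i in range(len(a1)) :
--         for j in range(len(a2)) :
--             a3[i+j] = (a3[i+j] + (a1[i] * a2[j]) % mm) % mm
--     return a3
--
-- def arradd(a1,a2,mm) :
--     return [(x+y) % mm for (x,y) in zip(a1,a2)]
--
-- def arrshift(a1) :
--     return [0] + a1[:-1]
--
-- def dfs(n,p,gr,mm) :
--     ## dp0 has no takahashi and no child takahashi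
--     ## dp1 has no takahashi and at least one child takahashi
--     ## dp2 has a takahashi
--     dp0,dp1,dp2 = [1,0],[0,0],[0,1]
--     for c in gr[n] :
--         if c == p : continue
--         dp0c,dp1c,dp2c = dfs(c,n,gr,mm)
--         c1 = arradd(dp0c,dp1c,mm)
--         c2 = arradd(c1,dp2c,mm)
--         c3 = arradd(arradd(dp1c,dp2c,mm),arrshift(dp0c),mm)
--         ndp0 = convolve(dp0,c1,mm)
--         ndp1 = arradd(convolve(arrshift(dp0),dp2c,mm),convolve(dp1,c2,mm),mm)
--         ndp2 = convolve(dp2,c3,mm)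
--         dp0,dp1,dp2 = ndp0,ndp1,ndp2
--     return dp0,dp1,dp2
-- ===== SOURCE B (Python) =====
-- def convolve(a1,a2,mm) :
--     a3 = [0] * (len(a1)+len(a2)-1)
--     for i in range(len(a1)) :
--         for j in range(len(a2)) :
--             a3[i+j] = (a3[i+j] + (a1[i] * a2[j]) % mm) % mm
--     return a3
--
-- def arradd(a1,a2,mm) :
--     return [(x+y) % mm for (x,y) in zip(a1,a2)]
--
-- def arrshift(a1) :
--     return [0] + a1[:-1]
--
-- def _fold(dp, cdp, mm) :
--     ## fold one finished child's triple into the parent's running triple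
--     dp0, dp1, dp2 = dp
--     dp0c, dp1c, dp2c = cdp
--     c1 = arradd(dp0c, dp1c, mm)
--     c2 = arradd(c1, dp2c, mm)
--     c3 = arradd(arradd(dp1c, dp2c, mm), arrshift(dp0c), mm)
--     return (convolve(dp0, c1, mm),
--             arradd(convolve(arrshift(dp0), dp2c, mm), convolve(dp1, c2, mm), mm),
--             convolve(dp2, c3, mm))
--
-- def dfs(n,p,gr,mm) :
--     ## iterative post-order traversal with an explicit stack instead of recursion
--     init = ([1,0],[0,0],[0,1])
--     stack = [(n, p, list(gr[n]), init)]
--     res = init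
--     while stack :
--         node, par, rem, dp = stack.pop()
--         if not rem :
--             if stack :  # finished: fold this node's triple into its parent's accumulator
--                 pn, pp, pr, pdp = stack.pop()
--                 stack.append((pn, pp, pr, _fold(pdp, dp, mm)))
--             else :
--                 res = dp
--         elif rem[0] == par :
--             stack.append((node, par, rem[1:], dp))
--         else :
--             c = rem[0]
--             stack.append((node, par, rem[1:], dp))
--             stack.append((c, node, list(gr[c]), init))
--     return res
-- ===== Notes on version B (the rewrite author's own statement) =====
-- stated objective: alternative
-- what changed: The recursive tree DP is replaced by an iterative post-order traversal with an explicit stack of (node, parent, remaining-children, accumulated-dp) frames: a node's triple is folded into its parent's accumulator when its frame finishes, instead of being returned up the call chain; the convolve/arradd/arrshift polynomial helpers are unchanged.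
import Mathlib
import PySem

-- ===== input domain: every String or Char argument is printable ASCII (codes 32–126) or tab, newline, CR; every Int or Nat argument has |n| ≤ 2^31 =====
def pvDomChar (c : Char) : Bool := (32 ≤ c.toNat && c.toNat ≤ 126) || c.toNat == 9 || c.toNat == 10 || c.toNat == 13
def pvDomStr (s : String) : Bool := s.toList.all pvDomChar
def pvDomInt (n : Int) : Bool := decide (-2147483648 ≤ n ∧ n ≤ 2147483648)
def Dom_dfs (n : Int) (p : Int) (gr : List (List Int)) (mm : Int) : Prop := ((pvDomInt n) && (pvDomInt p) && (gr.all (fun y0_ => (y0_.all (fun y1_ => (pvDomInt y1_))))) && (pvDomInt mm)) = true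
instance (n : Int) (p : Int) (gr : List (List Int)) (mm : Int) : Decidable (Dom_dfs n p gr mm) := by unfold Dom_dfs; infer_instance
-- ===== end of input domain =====

-- B replaces A's recursion by an iterative post-order traversal with an explicit stack
-- (same child order, same dp folding, same convolve/arradd/arrshift helpers): alternative
-- decomposition, no speed claim.

-- ===== PORT A =====
-- helpers shared by both versions (B keeps them unchanged)

def convolve (a1 a2 : List Int) (mm : Int) : List Int :=
  (List.range a1.length).foldl (fun a3 i =>
    (List.range a2.length).foldl (fun a3 j =>
      a3.set (i + j)
        (PySem.Int.mod (a3.getD (i + j) 0 + PySem.Int.mod (a1.getD i 0 * a2.getD j 0) mm) mm))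
      a3)
    (List.replicate (a1.length + a2.length - 1) 0)

def arradd (a1 a2 : List Int) (mm : Int) : List Int :=
  (a1.zip a2).map (fun xy => PySem.Int.mod (xy.1 + xy.2) mm)

-- [0] + a1[:-1]
def arrshift (a1 : List Int) : List Int := 0 :: a1.dropLast

-- A's `for c in gr[n]` loop body; `rec c q` stands for the recursive call dfs(c, q, gr, mm)
def goA (rec : Int → Int → Option (List Int × List Int × List Int)) (n p : Int) (mm : Int) :
    List Int → (List Int × List Int × List Int) → Option (List Int × List Int × List Int)
  | [], dp => some dp
  | c :: cs, dp =>
    if c = p then goA rec n p mm cs dp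
    else
      match rec c n with
      | none => none
      | some cdp =>
        let c1 := arradd cdp.1 cdp.2.1 mm
        let c2 := arradd c1 cdp.2.2 mm
        let c3 := arradd (arradd cdp.2.1 cdp.2.2 mm) (arrshift cdp.1) mm
        let ndp0 := convolve dp.1 c1 mm
        let ndp1 := arradd (convolve (arrshift dp.1) cdp.2.2 mm) (convolve dp.2.1 c2 mm) mm
        let ndp2 := convolve dp.2.2 c3 mm
        goA rec n p mm cs (ndp0, ndp1, ndp2)

-- fueled rendering of A's unbounded recursion (none = the recursion has not finished
-- within `fuel` levels; Python would still be recursing / raise RecursionError)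
def dfsAux : Nat → Int → Int → List (List Int) → Int → Option (List Int × List Int × List Int)
  | 0, _, _, _, _ => none
  | f + 1, n, p, gr, mm =>
      goA (fun c q => dfsAux f c q gr mm) n p mm
        ((PySem.List.pyGet? gr n).getD []) ([1, 0], [0, 0], [0, 1])

def rowLenSum (gr : List (List Int)) : Nat := (gr.map List.length).sum

-- an upper bound on the recursion depth of any terminating run (proven sufficient under Pre_)
def fuelA (gr : List (List Int)) : Nat := (rowLenSum gr + 2) * (rowLenSum gr + 2) + 2

def dfs (n : Int) (p : Int) (gr : List (List Int)) (mm : Int) : List Int × List Int × List Int :=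
  (dfsAux (fuelA gr) n p gr mm).getD ([1, 0], [0, 0], [0, 1])

-- ===== PORT B =====
-- B's _fold: fold one finished child's triple into the parent's running triple
def foldDP (dp cdp : List Int × List Int × List Int) (mm : Int) :
    List Int × List Int × List Int :=
  (convolve dp.1 (arradd cdp.1 cdp.2.1 mm) mm,
   arradd (convolve (arrshift dp.1) cdp.2.2 mm)
     (convolve dp.2.1 (arradd (arradd cdp.1 cdp.2.1 mm) cdp.2.2 mm) mm) mm,
   convolve dp.2.2 (arradd (arradd cdp.2.1 cdp.2.2 mm) (arrshift cdp.1) mm) mm)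

-- B's while loop over the explicit stack of (node, parent, remaining children, acc dp)
-- frames, fueled (none = the loop has not finished within `fuel` iterations)
def runB (gr : List (List Int)) (mm : Int) :
    Nat → List (Int × Int × List Int × (List Int × List Int × List Int)) →
    Option (List Int × List Int × List Int) → Option (List Int × List Int × List Int)
  | _, [], res => res
  | 0, _ :: _, _ => none
  | f + 1, (node, par, rem, dp) :: rest, res =>
    match rem with
    | [] =>
      match rest with
      | [] => runB gr mm f [] (some dp)
      | (pn, pp, pr, pdp) :: rest' => runB gr mm f ((pn, pp, pr, foldDP pdp dp mm) :: rest') res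
    | c :: rem' =>
      if c = par then runB gr mm f ((node, par, rem', dp) :: rest) res
      else
        runB gr mm f
          ((c, node, (PySem.List.pyGet? gr c).getD [], ([1, 0], [0, 0], [0, 1])) ::
            (node, par, rem', dp) :: rest) res

def maxRowLen (gr : List (List Int)) : Nat := gr.foldr (fun r m => max r.length m) 0

def cbf (d : Nat) : Nat → Nat
  | 0 => 0
  | g + 1 => 1 + d * (1 + cbf d g)

-- an upper bound on the number of loop iterations of any terminating run
def fuelB (gr : List (List Int)) : Nat :=
  1 + maxRowLen gr * (1 + cbf (maxRowLen gr) (fuelA gr))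

def dfs_alt (n : Int) (p : Int) (gr : List (List Int)) (mm : Int) :
    List Int × List Int × List Int :=
  (runB gr mm (fuelB gr)
      [(n, p, (PySem.List.pyGet? gr n).getD [], ([1, 0], [0, 0], [0, 1]))] none).getD
    ([1, 0], [0, 0], [0, 1])

-- ===== PRECONDITION & SPEC =====

-- badWalk gr f cur prev: the traversal of gr from cur (coming from prev, to which it
-- never backtracks directly) either reaches a node whose index is invalid (IndexError)
-- or still admits a non-backtracking walk of length f (a graph-shape property of gr:
-- with f = fuelA gr this means arbitrarily long walks exist, i.e. unbounded recursion)
def badWalk (gr : List (List Int)) : Nat → Int → Int → Bool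
  | 0, _, _ => true
  | f + 1, cur, prev =>
      match PySem.List.pyGet? gr cur with
      | none => true
      | some row => row.any (fun c => if c = prev then false else badWalk gr f c cur)

-- Pre_ excludes exactly inputs on which A raises: an out-of-range root index n or an
-- out-of-range neighbour entry reached by the traversal (IndexError), graphs admitting
-- arbitrarily long non-backtracking walks from n (unbounded recursion / RecursionError),
-- and mm = 0 when the root has a child ≠ p (ZeroDivisionError).
def Pre_dfs (n : Int) (p : Int) (gr : List (List Int)) (mm : Int) : Prop :=
  PySem.Raise.InRange gr.length n ∧
  (mm ≠ 0 ∨ ∀ c ∈ (PySem.List.pyGet? gr n).getD [], c = p) ∧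
  badWalk gr (fuelA gr) n p = false

instance (n : Int) (p : Int) (gr : List (List Int)) (mm : Int) : Decidable (Pre_dfs n p gr mm) := by
  unfold Pre_dfs; infer_instance

def pvWitness_dfs : Int × Int × List (List Int) × Int := (0, -1, [[1], [0]], 7)

def Spec_dfs (n : Int) (p : Int) (gr : List (List Int)) (mm : Int) (out : List Int × List Int × List Int) : Prop := out = dfs_alt n p gr mm
instance (n : Int) (p : Int) (gr : List (List Int)) (mm : Int) (out : List Int × List Int × List Int) : Decidable (Spec_dfs n p gr mm out) := by unfold Spec_dfs; infer_instance

-- ===== CLAIM (what is proved, stated in full; the proofs are below) =====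
def Claim_equal_dfs : Prop := ∀ (n : Int) (p : Int) (gr : List (List Int)) (mm : Int), Dom_dfs n p gr mm → Pre_dfs n p gr mm → Spec_dfs n p gr mm (dfs n p gr mm)

-- ===== LEMMAS AND PROOFS =====

lemma goA_cons (rec : Int → Int → Option (List Int × List Int × List Int)) (n p mm : Int)
    (c : Int) (cs : List Int) (dp : List Int × List Int × List Int) :
    goA rec n p mm (c :: cs) dp =
      if c = p then goA rec n p mm cs dp
      else
        match rec c n with
        | none => none
        | some cdp => goA rec n p mm cs (foldDP dp cdp mm) := by
  by_cases h : c = p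
  · simp [goA, h]
  · cases hr : rec c n <;> simp [goA, h, hr, foldDP]

lemma goA_none (rec : Int → Int → Option (List Int × List Int × List Int)) (n p mm : Int) :
    ∀ (l : List Int) (dp : List Int × List Int × List Int),
      goA rec n p mm l dp = none → ∃ c ∈ l, c ≠ p ∧ rec c n = none := by
  intro l
  induction l with
  | nil => intro dp h; simp [goA] at h
  | cons c cs ih =>
    intro dp h
    rw [goA_cons] at h
    by_cases hc : c = p
    · rw [if_pos hc] at h
      obtain ⟨c', hmem, hne, hnone⟩ := ih dp h
      exact ⟨c', List.mem_cons_of_mem _ hmem, hne, hnone⟩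
    · rw [if_neg hc] at h
      cases hr : rec c n with
      | none => exact ⟨c, List.mem_cons_self .., hc, hr⟩
      | some cdp =>
        rw [hr] at h
        obtain ⟨c', hmem, hne, hnone⟩ := ih _ h
        exact ⟨c', List.mem_cons_of_mem _ hmem, hne, hnone⟩

lemma dfsAux_none_badWalk (gr : List (List Int)) (mm : Int) :
    ∀ (f : Nat) (n p : Int), dfsAux f n p gr mm = none → badWalk gr f n p = true := by
  intro f
  induction f with
  | zero => intro n p _; rfl
  | succ f ih =>
    intro n p h
    rw [dfsAux] at h
    obtain ⟨c, hmem, hne, hnone⟩ := goA_none _ _ _ _ _ _ h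
    have hw := ih c n hnone
    cases hg : PySem.List.pyGet? gr n with
    | none => simp [badWalk, hg]
    | some row =>
      rw [hg] at hmem
      simp only [badWalk, hg, List.any_eq_true]
      exact ⟨c, by simpa using hmem, by simp [hne, hw]⟩

lemma maxRowLen_mem (gr : List (List Int)) (row : List Int) (h : row ∈ gr) :
    row.length ≤ maxRowLen gr := by
  induction gr with
  | nil => cases h
  | cons r tl ih =>
    rcases List.mem_cons.mp h with h | h
    · subst h; exact le_max_left _ _
    · exact le_trans (ih h) (le_max_right _ _)

lemma row_len_le (gr : List (List Int)) (c : Int) :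
    ((PySem.List.pyGet? gr c).getD []).length ≤ maxRowLen gr := by
  cases hr : PySem.List.pyGet? gr c with
  | none => simp
  | some row =>
    simpa using maxRowLen_mem gr row (PySem.List.mem_of_pyGet?_eq_some _ hr)

lemma cbf_le_succ (d g : Nat) : cbf d g ≤ cbf d (g + 1) := by
  induction g with
  | zero => simp [cbf]
  | succ g ih =>
    show cbf d (g + 1) ≤ cbf d (g + 2)
    have : d * (1 + cbf d g) ≤ d * (1 + cbf d (g + 1)) :=
      Nat.mul_le_mul_left d (by omega)
    calc cbf d (g + 1) = 1 + d * (1 + cbf d g) := rfl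
      _ ≤ 1 + d * (1 + cbf d (g + 1)) := by omega
      _ = cbf d (g + 2) := rfl

lemma cbf_mono (d : Nat) {g g' : Nat} (h : g ≤ g') : cbf d g ≤ cbf d g' := by
  induction g' with
  | zero => simp [Nat.le_zero.mp h]
  | succ g' ih =>
    rcases Nat.lt_or_ge g (g' + 1) with hlt | hge
    · exact le_trans (ih (by omega)) (cbf_le_succ d g')
    · have : g = g' + 1 := by omega
      subst this; rfl

-- one iteration of B's while loop
def stepB (gr : List (List Int)) (mm : Int)
    (fr : Int × Int × List Int × (List Int × List Int × List Int))
    (rest : List (Int × Int × List Int × (List Int × List Int × List Int)))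
    (res : Option (List Int × List Int × List Int)) :
    List (Int × Int × List Int × (List Int × List Int × List Int)) ×
      Option (List Int × List Int × List Int) :=
  match fr with
  | (node, par, rem, dp) =>
    match rem with
    | [] =>
      match rest with
      | [] => ([], some dp)
      | (pn, pp, pr, pdp) :: rest' => ((pn, pp, pr, foldDP pdp dp mm) :: rest', res)
    | c :: rem' =>
      if c = par then ((node, par, rem', dp) :: rest, res)
      else
        ((c, node, (PySem.List.pyGet? gr c).getD [], ([1, 0], [0, 0], [0, 1])) ::
          (node, par, rem', dp) :: rest, res)

lemma runB_nil (gr : List (List Int)) (mm : Int) (f : Nat)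
    (res : Option (List Int × List Int × List Int)) : runB gr mm f [] res = res := by
  cases f <;> rfl

lemma runB_succ (gr : List (List Int)) (mm : Int) (f : Nat)
    (fr : Int × Int × List Int × (List Int × List Int × List Int))
    (rest : List (Int × Int × List Int × (List Int × List Int × List Int)))
    (res : Option (List Int × List Int × List Int)) :
    runB gr mm (f + 1) (fr :: rest) res =
      runB gr mm f (stepB gr mm fr rest res).1 (stepB gr mm fr rest res).2 := by
  obtain ⟨node, par, rem, dp⟩ := fr
  cases rem with
  | nil =>
    cases rest with
    | nil => rfl
    | cons fr' rest' => obtain ⟨pn, pp, pr, pdp⟩ := fr'; rfl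
  | cons c rem' => by_cases hc : c = par <;> simp [runB, stepB, hc]

lemma runB_mono (gr : List (List Int)) (mm : Int) :
    ∀ (f : Nat) (s : List (Int × Int × List Int × (List Int × List Int × List Int)))
      (res : Option (List Int × List Int × List Int)) (v : List Int × List Int × List Int),
      runB gr mm f s res = some v → runB gr mm (f + 1) s res = some v := by
  intro f
  induction f with
  | zero =>
    intro s res v h
    cases s with
    | nil => rw [runB_nil] at h; rw [runB_nil]; exact h
    | cons fr rest => obtain ⟨a, b, c, d⟩ := fr; cases c <;> simp [runB] at h
  | succ f ih =>
    intro s res v h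
    cases s with
    | nil => rw [runB_nil] at h; rw [runB_nil]; exact h
    | cons fr rest =>
      rw [runB_succ] at h
      rw [runB_succ]
      exact ih _ _ _ h

lemma runB_mono_le (gr : List (List Int)) (mm : Int) {f f' : Nat} (hle : f ≤ f')
    (s : List (Int × Int × List Int × (List Int × List Int × List Int)))
    (res : Option (List Int × List Int × List Int)) (v : List Int × List Int × List Int)
    (h : runB gr mm f s res = some v) : runB gr mm f' s res = some v := by
  induction f' with
  | zero => have : f = 0 := by omega
            subst this; exact h
  | succ f' ih =>
    rcases Nat.lt_or_ge f (f' + 1) with hlt | hge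
    · exact runB_mono gr mm f' s res v (ih (by omega))
    · have : f = f' + 1 := by omega
      subst this; exact h

-- what the stack looks like right after the frame on top has been fully processed
-- and has delivered its triple `out`
def deliver (gr : List (List Int)) (mm : Int) (k : Nat)
    (rest : List (Int × Int × List Int × (List Int × List Int × List Int)))
    (res : Option (List Int × List Int × List Int)) (out : List Int × List Int × List Int) :
    Option (List Int × List Int × List Int) :=
  match rest with
  | [] => runB gr mm k [] (some out)
  | (pn, pp, pr, pdp) :: rest' => runB gr mm k ((pn, pp, pr, foldDP pdp out mm) :: rest') res

-- the simulation lemma: if A's loop over `rem` (with recursion fuel g) returns `out`,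
-- then B's machine, started with that frame on top, runs for some f ≤ cb(g, |rem|) steps
-- and then behaves exactly like a stack into which `out` has been delivered
lemma runB_sim (gr : List (List Int)) (mm : Int) :
    ∀ (g : Nat) (n p : Int) (rem : List Int) (dp out : List Int × List Int × List Int),
      goA (fun c q => dfsAux g c q gr mm) n p mm rem dp = some out →
      ∃ f, f ≤ 1 + rem.length * (1 + cbf (maxRowLen gr) g) ∧
        ∀ (k : Nat) (rest : List (Int × Int × List Int × (List Int × List Int × List Int)))
          (res : Option (List Int × List Int × List Int)),
          runB gr mm (f + k) ((n, p, rem, dp) :: rest) res = deliver gr mm k rest res out := by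
  intro g
  induction g using Nat.strong_induction_on with
  | _ g IH =>
    intro n p rem
    induction rem with
    | nil =>
      intro dp out h
      simp only [goA, Option.some.injEq] at h
      subst h
      refine ⟨1, by omega, ?_⟩
      intro k rest res
      have e : 1 + k = k + 1 := by omega
      rw [e]
      cases rest with
      | nil => rfl
      | cons fr rest' => obtain ⟨pn, pp, pr, pdp⟩ := fr; rfl
    | cons c cs ih =>
      intro dp out h
      rw [goA_cons] at h
      by_cases hc : c = p
      · rw [if_pos hc] at h
        obtain ⟨f, hfb, hf⟩ := ih dp out h
        refine ⟨f + 1, ?_, ?_⟩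
        · have e : (cs.length + 1) * (1 + cbf (maxRowLen gr) g) =
              cs.length * (1 + cbf (maxRowLen gr) g) + (1 + cbf (maxRowLen gr) g) :=
            Nat.succ_mul _ _
          simp only [List.length_cons]
          omega
        · intro k rest res
          have e : f + 1 + k = (f + k) + 1 := by omega
          rw [e, runB_succ]
          simp only [stepB, if_pos hc]
          exact hf k rest res
      · rw [if_neg hc] at h
        cases hr : dfsAux g c n gr mm with
        | none => rw [hr] at h; cases h
        | some cdp =>
          rw [hr] at h
          obtain ⟨f2, hb2, h2⟩ := ih (foldDP dp cdp mm) out h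
          cases g with
          | zero => simp [dfsAux] at hr
          | succ g0 =>
            rw [dfsAux] at hr
            obtain ⟨f1, hb1, h1⟩ := IH g0 (by omega) c n _ _ _ hr
            refine ⟨1 + f1 + f2, ?_, ?_⟩
            · have hrow := row_len_le gr c
              have hb1' : f1 ≤ 1 + maxRowLen gr * (1 + cbf (maxRowLen gr) g0) :=
                le_trans hb1 (by
                  have := Nat.mul_le_mul_right (1 + cbf (maxRowLen gr) g0) hrow
                  omega)
              have ecb : cbf (maxRowLen gr) (g0 + 1) = 1 + maxRowLen gr * (1 + cbf (maxRowLen gr) g0) := rfl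
              have e : (cs.length + 1) * (1 + cbf (maxRowLen gr) (g0 + 1)) =
                  cs.length * (1 + cbf (maxRowLen gr) (g0 + 1)) + (1 + cbf (maxRowLen gr) (g0 + 1)) :=
                Nat.succ_mul _ _
              simp only [List.length_cons]
              omega
            · intro k rest res
              have e : 1 + f1 + f2 + k = (f1 + (f2 + k)) + 1 := by omega
              rw [e, runB_succ]
              simp only [stepB, if_neg hc]
              rw [h1 (f2 + k) ((n, p, cs, dp) :: rest) res]
              show runB gr mm (f2 + k) ((n, p, cs, foldDP dp cdp mm) :: rest) res = _
              exact h2 k rest res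

-- ===== VERDICT (by name: the statement is the Claim_ definition above) =====
theorem dfs_spec : Claim_equal_dfs := by
  unfold Claim_equal_dfs
  intro n p gr mm _ hpre
  obtain ⟨_, _, hwalk⟩ := hpre
  show dfs n p gr mm = dfs_alt n p gr mm
  obtain ⟨out, hout⟩ : ∃ out, dfsAux (fuelA gr) n p gr mm = some out := by
    cases h : dfsAux (fuelA gr) n p gr mm with
    | none => rw [dfsAux_none_badWalk gr mm _ _ _ h] at hwalk; cases hwalk
    | some out => exact ⟨out, rfl⟩
  have hdfs : dfs n p gr mm = out := by unfold dfs; rw [hout]; rfl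
  obtain ⟨m, hm⟩ : ∃ m, fuelA gr = m + 1 := ⟨fuelA gr - 1, by unfold fuelA; omega⟩
  rw [hm, dfsAux] at hout
  obtain ⟨f, hfb, hrun⟩ := runB_sim gr mm m n p _ _ _ hout
  have h1 := hrun 0 [] none
  rw [Nat.add_zero] at h1
  have h1' : runB gr mm f
      [(n, p, (PySem.List.pyGet? gr n).getD [], ([1, 0], [0, 0], [0, 1]))] none = some out := by
    rw [h1]; unfold deliver; rw [runB_nil]
  have hfle : f ≤ fuelB gr := by
    have hrow := row_len_le gr n
    have hg : cbf (maxRowLen gr) m ≤ cbf (maxRowLen gr) (fuelA gr) := cbf_mono _ (by omega)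
    have h2 : ((PySem.List.pyGet? gr n).getD []).length * (1 + cbf (maxRowLen gr) m) ≤
        maxRowLen gr * (1 + cbf (maxRowLen gr) (fuelA gr)) :=
      Nat.mul_le_mul hrow (by omega)
    unfold fuelB
    omega
  have h4 := runB_mono_le gr mm hfle _ _ _ h1'
  unfold dfs_alt
  rw [h4, hdfs]
  rfl
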